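-- pv_equiv track=rewrite | github.com/mjenrungrot/model-training-framework | model_training_framework/trainer/multi_dataloader.py | build_alternating_schedule
-- ===== SOURCE A (Python) =====
-- def build_alternating_schedule(
--
--     pattern: list[int],
--     total_steps: int,
--     burst_size: int = 1,
-- ) -> list[int]:
--     """
--     Build alternating schedule following explicit pattern.
--
--     Args:
--         pattern: List of loader indices defining the pattern
--         total_steps: Total number of steps in epoch
--         burst_size: Number of consecutive batches per loader
--
--     Returns:
--         List of loader indices representing the schedule
--     """
--     if not pattern:
--         return []
--
--     schedule: list[int] = []
--     pattern_idx = 0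
--
--     while len(schedule) < total_steps:
--         loader_idx = pattern[pattern_idx]
--
--         # Add burst_size batches from current loader
--         for _ in range(min(burst_size, total_steps - len(schedule))):
--             schedule.append(loader_idx)
--
--         pattern_idx = (pattern_idx + 1) % len(pattern)
--
--     return schedule
-- ===== SOURCE B (Python) =====
-- def build_alternating_schedule(
--     pattern: list[int],
--     total_steps: int,
--     burst_size: int = 1,
-- ) -> list[int]:
--     if not pattern:
--         return []
--     n = len(pattern)
--     return [pattern[(i // burst_size) % n] for i in range(total_steps)]
-- ===== Notes on version B (the rewrite author's own statement) =====
-- stated objective: simpler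
-- what changed: Replaced the while-loop with a mutable schedule/pattern_idx cursor and an inner burst-append loop by a single list comprehension that computes each position's loader by closed form pattern[(i // burst_size) % len(pattern)].
import Mathlib
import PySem

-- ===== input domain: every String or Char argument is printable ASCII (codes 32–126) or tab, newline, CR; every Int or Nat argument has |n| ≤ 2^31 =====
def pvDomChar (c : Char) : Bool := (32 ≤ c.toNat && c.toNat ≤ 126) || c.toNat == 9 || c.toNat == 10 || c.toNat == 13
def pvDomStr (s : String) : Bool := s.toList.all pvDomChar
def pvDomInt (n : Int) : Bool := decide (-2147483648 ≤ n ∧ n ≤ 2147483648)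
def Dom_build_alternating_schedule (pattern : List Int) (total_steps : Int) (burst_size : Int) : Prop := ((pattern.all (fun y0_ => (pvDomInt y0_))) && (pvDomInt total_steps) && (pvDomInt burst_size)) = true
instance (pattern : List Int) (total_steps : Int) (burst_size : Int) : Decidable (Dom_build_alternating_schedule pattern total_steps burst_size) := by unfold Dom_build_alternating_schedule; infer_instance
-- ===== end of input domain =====

-- B replaces A's while-loop with cursor state and inner burst loop by one closed-form map over the step indices (objective: simpler).

-- ===== PORT A =====
-- the while-loop; fuel = total_steps.toNat suffices since (under Pre_) every iteration appends at least one element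
def buildLoopA (pattern : List Int) (total_steps burst_size : Int)
    (schedule : List Int) (pattern_idx : Int) : Nat → List Int
  | 0 => schedule
  | Nat.succ fuel =>
    if (schedule.length : Int) < total_steps then
      -- loader_idx = pattern[pattern_idx]; the index is always in range (it is k % len), so the default 0 is never used
      let loader_idx := PySem.List.pyGetD pattern pattern_idx 0
      -- for _ in range(min(burst_size, total_steps - len(schedule))): schedule.append(loader_idx)
      let schedule' := schedule ++ List.replicate (min burst_size (total_steps - (schedule.length : Int))).toNat loader_idx
      buildLoopA pattern total_steps burst_size schedule'
        (PySem.Int.mod (pattern_idx + 1) (pattern.length : Int)) fuel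
    else schedule

def build_alternating_schedule (pattern : List Int) (total_steps : Int) (burst_size : Int) : List Int :=
  if pattern = [] then []
  else buildLoopA pattern total_steps burst_size [] 0 total_steps.toNat

-- ===== PORT B =====
def build_alternating_schedule_alt (pattern : List Int) (total_steps : Int) (burst_size : Int) : List Int :=
  if pattern = [] then []
  else (PySem.List.pyRange 0 total_steps 1).map
    (fun i => PySem.List.pyGetD pattern
      (PySem.Int.mod (PySem.Int.floordiv i burst_size) (pattern.length : Int)) 0)

-- ===== PRECONDITION & SPEC =====
-- Pre_ excludes only burst_size ≤ 0 with total_steps > 0 and a nonempty pattern: there A's while-loop never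
-- makes progress and diverges (and B raises ZeroDivisionError for burst_size = 0); A returns on all admitted inputs.
def Pre_build_alternating_schedule (pattern : List Int) (total_steps : Int) (burst_size : Int) : Prop :=
  pattern = [] ∨ total_steps ≤ 0 ∨ 1 ≤ burst_size
instance (pattern : List Int) (total_steps : Int) (burst_size : Int) : Decidable (Pre_build_alternating_schedule pattern total_steps burst_size) := by unfold Pre_build_alternating_schedule; infer_instance
def pvWitness_build_alternating_schedule : List Int × Int × Int := ([0, 1, 2], 7, 2)

def Spec_build_alternating_schedule (pattern : List Int) (total_steps : Int) (burst_size : Int) (out : List Int) : Prop := out = build_alternating_schedule_alt pattern total_steps burst_size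
instance (pattern : List Int) (total_steps : Int) (burst_size : Int) (out : List Int) : Decidable (Spec_build_alternating_schedule pattern total_steps burst_size out) := by unfold Spec_build_alternating_schedule; infer_instance

-- ===== CLAIM (what is proved, stated in full; the proofs are below) =====
def Claim_equal_build_alternating_schedule : Prop := ∀ (pattern : List Int) (total_steps : Int) (burst_size : Int), Dom_build_alternating_schedule pattern total_steps burst_size → Pre_build_alternating_schedule pattern total_steps burst_size → Spec_build_alternating_schedule pattern total_steps burst_size (build_alternating_schedule pattern total_steps burst_size)

-- ===== LEMMAS AND PROOFS =====

-- the common closed-form schedule, in Nat form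
def specSched (pattern : List Int) (b m : Nat) : List Int :=
  (List.range m).map (fun i => pattern.getD ((i / b) % pattern.length) 0)

lemma specSched_length (pattern : List Int) (b m : Nat) : (specSched pattern b m).length = m := by
  simp [specSched]

lemma specSched_append (pattern : List Int) (b m d : Nat) (c : Int)
    (hc : ∀ j < d, pattern.getD (((m + j) / b) % pattern.length) 0 = c) :
    specSched pattern b (m + d) = specSched pattern b m ++ List.replicate d c := by
  unfold specSched
  rw [List.range_add, List.map_append, List.map_map]
  congr 1
  rw [List.eq_replicate_iff]
  constructor
  · simp
  · intro x hx
    simp only [List.mem_map, List.mem_range, Function.comp] at hx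
    obtain ⟨j, hj, rfl⟩ := hx
    exact hc j hj

lemma loop_inv (pattern : List Int) (hp : pattern ≠ []) (b : Nat) (hb : 1 ≤ b) (T : Nat) :
    ∀ (fuel k : Nat), T ≤ k * b + fuel →
    buildLoopA pattern (T : Int) (b : Int) (specSched pattern b (min T (k * b))) ((k % pattern.length : Nat) : Int) fuel
      = specSched pattern b T := by
  intro fuel
  induction fuel with
  | zero =>
    intro k hk
    simp only [buildLoopA]
    congr 1
    omega
  | succ fuel ih =>
    intro k hk
    rw [buildLoopA]
    by_cases hlt : k * b < T
    · have hmin : min T (k * b) = k * b := by omega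
      rw [hmin]
      have hL : 0 < pattern.length := List.length_pos_iff.mpr hp
      simp only [specSched_length, Nat.cast_lt, hlt, if_pos]
      have hload : PySem.List.pyGetD pattern ((k % pattern.length : Nat) : Int) 0
          = pattern.getD (k % pattern.length) 0 :=
        PySem.List.pyGetD_natCast pattern (k % pattern.length) 0
      have htake : (min (b : Int) ((T : Int) - ((k * b : Nat) : Int))).toNat = min b (T - k * b) := by
        omega
      have hmod : PySem.Int.mod (((k % pattern.length : Nat) : Int) + 1) (pattern.length : Int)
          = (((k + 1) % pattern.length : Nat) : Int) := by
        have : (((k % pattern.length : Nat) : Int) + 1) = (((k % pattern.length + 1 : Nat)) : Int) := by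
          push_cast; ring
        rw [this, PySem.Int.mod_natCast]
        congr 1
        exact Nat.mod_add_mod k pattern.length 1
      rw [hload, htake, hmod]
      have hsched : specSched pattern b (k * b) ++
          List.replicate (min b (T - k * b)) (pattern.getD (k % pattern.length) 0)
          = specSched pattern b (min T ((k + 1) * b)) := by
        have hmin2 : min T ((k + 1) * b) = k * b + min b (T - k * b) := by
          have hkb : (k + 1) * b = k * b + b := by ring
          omega
        rw [hmin2, specSched_append]
        intro j hj
        have hdiv : (k * b + j) / b = k := by
          rw [Nat.add_comm, Nat.add_mul_div_right j k (by omega : 0 < b),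
            Nat.div_eq_of_lt (by omega : j < b), Nat.zero_add]
        rw [hdiv]
      rw [hsched]
      have hkb : (k + 1) * b = k * b + b := by ring
      exact ih (k + 1) (by omega)
    · have hmin : min T (k * b) = T := by omega
      rw [hmin]
      simp only [specSched_length]
      rw [if_neg (by omega)]

lemma pre_main (pattern : List Int) (hp : pattern ≠ []) (b : Nat) (hb : 1 ≤ b) (T : Nat) :
    buildLoopA pattern (T : Int) (b : Int) [] 0 T = specSched pattern b T := by
  have h0 : specSched pattern b (min T (0 * b)) = [] := by simp [specSched]
  have := loop_inv pattern hp b hb T T 0 (by omega)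
  simpa [h0] using this

lemma alt_eq_spec (pattern : List Int) (hp : pattern ≠ []) (b : Nat) (total : Int) :
    build_alternating_schedule_alt pattern total (b : Int)
      = specSched pattern b total.toNat := by
  unfold build_alternating_schedule_alt specSched
  rw [if_neg hp, PySem.List.pyRange_one]
  rw [List.map_map]
  have : (total - 0).toNat = total.toNat := by omega
  rw [this]
  apply List.map_congr_left
  intro k hk
  simp only [Function.comp, zero_add]
  have hfd : PySem.Int.floordiv (k : Int) (b : Int) = ((k / b : Nat) : Int) :=
    PySem.Int.floordiv_natCast k b
  rw [hfd, PySem.Int.mod_natCast]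
  exact PySem.List.pyGetD_natCast pattern (k / b % pattern.length) 0

-- ===== VERDICT (by name: the statement is the Claim_ definition above) =====
theorem build_alternating_schedule_spec : Claim_equal_build_alternating_schedule := by
  intro pattern total burst _hdom hpre
  unfold Spec_build_alternating_schedule
  by_cases hp : pattern = []
  · simp [build_alternating_schedule, build_alternating_schedule_alt, hp]
  · by_cases ht : total ≤ 0
    · have h1 : build_alternating_schedule pattern total burst = [] := by
        unfold build_alternating_schedule
        rw [if_neg hp]
        have : total.toNat = 0 := by omega
        rw [this, buildLoopA]
      have h2 : build_alternating_schedule_alt pattern total burst = [] := by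
        unfold build_alternating_schedule_alt
        rw [if_neg hp, PySem.List.pyRange_one]
        have : (total - 0).toNat = 0 := by omega
        rw [this]
        simp
      rw [h1, h2]
    · have hb : 1 ≤ burst := by
        rcases hpre with h | h | h
        · exact absurd h hp
        · exact absurd h ht
        · exact h
      have hbcast : burst = (burst.toNat : Int) := by omega
      have htcast : total = (total.toNat : Int) := by omega
      unfold build_alternating_schedule
      rw [if_neg hp, hbcast, htcast]
      rw [Int.toNat_natCast]
      rw [pre_main pattern hp burst.toNat (by omega) total.toNat]
      rw [alt_eq_spec pattern hp burst.toNat]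
      congr 1
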